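-- pv_equiv track=rewrite | github.com/gillianroberts1/weekend1_homework | start_point/advanced_logic_exercise.py | unlucky_13
-- ===== SOURCE A (Python) =====
-- def unlucky_13(numbers):
--     index = 0
--     total = 0
--
--     while index < len(numbers):
--         if numbers[index] == 13:
--             for index in range(index +1, len(numbers)):# if it finds 13 then move on one without adding
--                 break
--
--         else:
--          total += numbers[index]
--
--         index += 1
--
--     return total
-- ===== SOURCE B (Python) =====
-- def unlucky_13(numbers):
--     # Sum every non-13 element, then subtract each element that directly
--     # follows an odd-length maximal run of consecutive 13s (only those runs
--     # actually skip their successor: within a run the 13s alternate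
--     # active/skipped, so a run of k 13s skips the next element iff k is odd).
--     total = sum(x for x in numbers if x != 13)
--     run = 0
--     for x in numbers:
--         if x == 13:
--             run += 1
--         else:
--             if run % 2 == 1:
--                 total -= x
--             run = 0
--     return total
-- ===== Notes on version B (the rewrite author's own statement) =====
-- stated objective: alternative
-- what changed: Replaces the sequential skip-next index loop by a subtraction scheme: sum every non-13 element in one bulk pass, then subtract each element that follows an odd-length maximal run of consecutive 13s (run-length parity decides whether the run skips its successor).
import Mathlib
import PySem

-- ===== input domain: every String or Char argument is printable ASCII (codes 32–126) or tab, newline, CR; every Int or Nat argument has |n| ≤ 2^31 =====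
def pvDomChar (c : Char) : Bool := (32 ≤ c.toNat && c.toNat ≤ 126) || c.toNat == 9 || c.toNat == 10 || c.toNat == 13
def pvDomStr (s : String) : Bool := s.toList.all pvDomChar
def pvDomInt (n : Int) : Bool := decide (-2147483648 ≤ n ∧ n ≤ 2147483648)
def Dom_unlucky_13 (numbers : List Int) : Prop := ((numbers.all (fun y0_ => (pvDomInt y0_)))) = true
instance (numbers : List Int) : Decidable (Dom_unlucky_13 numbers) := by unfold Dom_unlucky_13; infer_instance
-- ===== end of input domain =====

-- B replaces A's sequential skip-next index loop by a different algorithm: sum all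
-- non-13 elements, then subtract the elements that follow odd-length runs of
-- consecutive 13s (run-length parity); same O(n) cost ("alternative").


-- ===== PORT A =====
-- while loop over an integer index; on a 13 the 'for index in range(index+1, len)…break'
-- sets index := index+1 when that range is nonempty, then index += 1.
def unlucky_13_go (numbers : List Int) (index : Nat) (total : Int) : Int :=
  if _h : index < numbers.length then
    if numbers.getD index 0 = 13 then
      let index' := if index + 1 < numbers.length then index + 1 else index
      unlucky_13_go numbers (index' + 1) total
    else
      unlucky_13_go numbers (index + 1) (total + numbers.getD index 0)
  else total
termination_by numbers.length - index
decreasing_by · split <;> omega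
              · omega

def unlucky_13 (numbers : List Int) : Int := unlucky_13_go numbers 0 0

-- ===== PORT B =====
-- two passes: sum of all non-13 elements, then a fold carrying the current run
-- length of consecutive 13s, subtracting each element after an odd-length run.
def unlucky_13_alt (numbers : List Int) : Int :=
  let total := (numbers.filter (fun x => decide (x ≠ 13))).sum
  let st := numbers.foldl
      (fun (s : Nat × Int) x =>
        if x = 13 then (s.1 + 1, s.2)
        else (0, if s.1 % 2 = 1 then s.2 - x else s.2))
      (0, total)
  st.2

-- ===== PRECONDITION & SPEC =====
def Spec_unlucky_13 (numbers : List Int) (out : Int) : Prop := out = unlucky_13_alt numbers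
instance (numbers : List Int) (out : Int) : Decidable (Spec_unlucky_13 numbers out) := by unfold Spec_unlucky_13; infer_instance

-- ===== CLAIM (what is proved, stated in full; the proofs are below) =====
def Claim_equal_unlucky_13 : Prop := ∀ (numbers : List Int), Dom_unlucky_13 numbers → Spec_unlucky_13 numbers (unlucky_13 numbers)

-- ===== LEMMAS AND PROOFS =====

-- reference recursion: the "skip the element after a 13" semantics, used as the
-- middle point between the two ports.
def skipSum (numbers : List Int) : Int :=
  match numbers with
  | [] => 0
  | x :: rest => if x = 13 then skipSum rest.tail else x + skipSum rest
termination_by numbers.length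
decreasing_by · simp [List.length_tail]
              · simp

-- amount B's fold subtracts, given an incoming run length r of consecutive 13s
def subAmt (r : Nat) (l : List Int) : Int :=
  match l with
  | [] => 0
  | x :: xs => if x = 13 then subAmt (r + 1) xs
               else (if r % 2 = 1 then x else 0) + subAmt 0 xs

theorem foldl_eq_subAmt (l : List Int) : ∀ (r : Nat) (t : Int),
    (l.foldl (fun (s : Nat × Int) x =>
        if x = 13 then (s.1 + 1, s.2)
        else (0, if s.1 % 2 = 1 then s.2 - x else s.2)) (r, t)).2 = t - subAmt r l := by
  induction l with
  | nil => intro r t; simp [subAmt]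
  | cons x xs ih =>
    intro r t
    by_cases h : x = 13
    · simp [h, subAmt, ih]
    · by_cases hr : r % 2 = 1 <;> simp [h, hr, subAmt, ih] <;> ring

theorem filter_sub_eq_skipSum (l : List Int) : ∀ (r : Nat),
    (l.filter (fun x => decide (x ≠ 13))).sum - subAmt r l
      = if r % 2 = 1 then skipSum l.tail else skipSum l := by
  induction l with
  | nil => intro r; simp [subAmt, skipSum]
  | cons x xs ih =>
    intro r
    by_cases h : x = 13
    · rw [show subAmt r (x :: xs) = subAmt (r + 1) xs by rw [subAmt]; simp [h],
          show List.filter (fun y => decide (y ≠ 13)) (x :: xs)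
              = List.filter (fun y => decide (y ≠ 13)) xs by simp [h],
          ih (r + 1)]
      by_cases hr : r % 2 = 1
      · have h2 : ¬ ((r + 1) % 2 = 1) := by omega
        simp [hr, h2]
      · have h1 : (r + 1) % 2 = 1 := by omega
        rw [show skipSum (x :: xs) = skipSum xs.tail by rw [skipSum]; simp [h]]
        simp [hr, h1]
    · by_cases hr : r % 2 = 1
      · rw [show skipSum ((x :: xs).tail) = skipSum xs from rfl]
        have := ih 0
        simp [h, subAmt, hr, List.filter_cons] at this ⊢
        omega
      · rw [show skipSum (x :: xs) = x + skipSum xs by rw [skipSum]; simp [h]]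
        have := ih 0
        simp [h, subAmt, hr, List.filter_cons] at this ⊢
        omega

theorem alt_eq_skipSum (l : List Int) : unlucky_13_alt l = skipSum l := by
  unfold unlucky_13_alt
  rw [foldl_eq_subAmt]
  simpa using filter_sub_eq_skipSum l 0

theorem unlucky_13_go_eq (numbers : List Int) :
    ∀ n index total, numbers.length - index ≤ n →
      unlucky_13_go numbers index total = total + skipSum (numbers.drop index) := by
  intro n
  induction n with
  | zero =>
    intro index total h
    rw [unlucky_13_go]
    have hge : ¬ index < numbers.length := by omega
    rw [List.drop_eq_nil_of_le (by omega)]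
    simp [hge, skipSum]
  | succ n ih =>
    intro index total h
    by_cases hlt : index < numbers.length
    case neg =>
      rw [unlucky_13_go]
      rw [List.drop_eq_nil_of_le (by omega)]
      simp [hlt, skipSum]
    case pos =>
      have hdrop : numbers.drop index = numbers[index] :: numbers.drop (index + 1) :=
        List.drop_eq_getElem_cons hlt
      have hget : numbers.getD index 0 = numbers[index] := List.getD_eq_getElem _ _ hlt
      rw [unlucky_13_go, dif_pos hlt, hget, hdrop]
      by_cases h13 : numbers[index] = 13
      · rw [if_pos h13]
        rw [skipSum, if_pos h13]
        have htail : (numbers.drop (index + 1)).tail = numbers.drop (index + 2) := by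
          rw [List.tail_drop]
        rw [htail]
        by_cases h2 : index + 1 < numbers.length
        · rw [if_pos h2]
          exact ih (index + 2) total (by omega)
        · rw [if_neg h2]
          rw [ih (index + 1) total (by omega)]
          rw [List.drop_eq_nil_of_le (show numbers.length ≤ index + 1 by omega),
              List.drop_eq_nil_of_le (show numbers.length ≤ index + 2 by omega)]
      · rw [if_neg h13]
        rw [skipSum, if_neg h13]
        rw [ih (index + 1) (total + numbers[index]) (by omega)]
        ring

-- ===== VERDICT (by name: the statement is the Claim_ definition above) =====
theorem unlucky_13_spec : Claim_equal_unlucky_13 := by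
  intro numbers _
  unfold Spec_unlucky_13 unlucky_13
  rw [unlucky_13_go_eq numbers numbers.length 0 0 (by omega), alt_eq_skipSum]
  simp
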